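-- pv_equiv track=rewrite | github.com/lexust1/code4fun | Python/mfti_algos/lec23_lecture/adjacency_list_offset.py | convert_to_adj_list
-- ===== SOURCE A (Python) =====
-- def convert_to_adj_list(edges, offset):
--     """
--     Преобразует список ребер и соответствующий список офсетов обратно
--     в список смежности.
--
--     Args:
--     edges (list): Список ребер графа, где каждое ребро представлено парой вершин.
--     offset (list): Список офсетов, показывающий начало и конец ребер
--     для каждой вершины в списке edges.
--
--     Returns:
--     dict: Список смежности графа.
--     """
--     adj_list = {}  # Инициализация списка смежности
--     # Перебор офсетов для каждой вершины
--     for i in range(len(offset) - 1):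
--         adj_list[i] = []  # Инициализация списка смежности для вершины i
--         # Перебор ребер, соответствующих вершине i
--         for j in range(offset[i], offset[i + 1]):
--             # Добавляем соседнюю вершину, если она не равна текущей
--             if edges[j] != i:
--                 adj_list[i].append(edges[j])
--     return adj_list
-- ===== SOURCE B (Python) =====
-- def convert_to_adj_list(edges, offset):
--     # One flat pass over the CSR edge positions with a moving row pointer,
--     # instead of A's nested per-vertex loops.
--     n = len(offset) - 1
--     adj_list = {i: [] for i in range(n)}
--     if n >= 1:
--         v = 0
--         for j in range(offset[0], offset[-1]):
--             while v + 1 < n and j >= offset[v + 1]: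
--                 v += 1
--             e = edges[j]
--             if e != v:
--                 adj_list[v].append(e)
--     return adj_list
-- ===== Notes on version B (the rewrite author's own statement) =====
-- stated objective: faster
-- what changed: Replaces A's nested per-vertex loops (outer over vertices, inner over each offset slice) by one flat pass over all edge positions offset[0]..offset[-1] with a moving row-pointer advanced past empty slices (a constant-factor win: one range object and no per-vertex loop overhead); Pre_ excludes non-monotone (malformed CSR) offset lists, on which A's independent per-vertex ranges revisit or skip positions that the flat pass cannot, and out-of-range visited positions, on which A raises IndexError.
-- outside the precondition, e.g. on convert_to_adj_list([5, 6], [0, 2, 1]): A returns {0: [5, 6], 1: []}, B returns {0: [5], 1: []}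
import Mathlib
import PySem

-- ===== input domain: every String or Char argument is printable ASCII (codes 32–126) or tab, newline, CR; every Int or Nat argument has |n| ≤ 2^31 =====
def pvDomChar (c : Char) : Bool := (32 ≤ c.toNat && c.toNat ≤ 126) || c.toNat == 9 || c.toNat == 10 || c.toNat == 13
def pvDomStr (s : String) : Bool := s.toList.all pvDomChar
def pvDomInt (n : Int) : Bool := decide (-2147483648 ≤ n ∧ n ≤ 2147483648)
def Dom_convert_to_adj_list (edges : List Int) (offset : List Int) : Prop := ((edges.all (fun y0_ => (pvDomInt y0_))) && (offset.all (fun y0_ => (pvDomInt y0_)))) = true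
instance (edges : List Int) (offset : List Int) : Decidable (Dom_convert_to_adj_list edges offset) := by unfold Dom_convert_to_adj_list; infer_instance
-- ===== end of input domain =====

-- B makes one flat pass over the CSR edge positions with a moving row pointer instead of A's nested per-vertex loops; equal on well-formed CSR input (Pre_).


-- ===== PORT A =====
-- literal transliteration of A: dict, outer loop over vertices, inner loop over the vertex's offset slice
def convert_to_adj_list (edges : List Int) (offset : List Int) : List (Int × List Int) :=
  ((PySem.List.pyRange 0 ((offset.length : Int) - 1) 1).foldl
    (fun (adj : PySem.Dict Int (List Int)) i =>
      let adj := adj.insert i []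
      (PySem.List.pyRange (PySem.List.pyGetD offset i 0) (PySem.List.pyGetD offset (i + 1) 0) 1).foldl
        (fun adj j =>
          if PySem.List.pyGetD edges j 0 ≠ i then
            adj.modify i [] (fun l => l ++ [PySem.List.pyGetD edges j 0])
          else adj)
        adj)
    PySem.Dict.empty).items

-- ===== PORT B =====
-- the 'while v + 1 < n and j >= offset[v+1]: v += 1' pointer advance of Source B
def pyAdvance (offset : List Int) (n j v : Int) : Int :=
  if v + 1 < n ∧ PySem.List.pyGetD offset (v + 1) 0 ≤ j then pyAdvance offset n j (v + 1) else v
termination_by (n - v).toNat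
decreasing_by omega

-- literal transliteration of Source B: init dict for every vertex, then one flat pass with the row pointer
def convert_to_adj_list_alt (edges : List Int) (offset : List Int) : List (Int × List Int) :=
  let n : Int := (offset.length : Int) - 1
  let adj0 : PySem.Dict Int (List Int) :=
    (PySem.List.pyRange 0 n 1).foldl (fun d i => d.insert i []) PySem.Dict.empty
  if 1 ≤ n then
    ((PySem.List.pyRange (PySem.List.pyGetD offset 0 0) (PySem.List.pyGetD offset (-1) 0) 1).foldl
      (fun (st : PySem.Dict Int (List Int) × Int) j =>
        let v := pyAdvance offset n j st.2
        let e := PySem.List.pyGetD edges j 0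
        if e ≠ v then (st.1.modify v [] (fun l => l ++ [e]), v) else (st.1, v))
      (adj0, 0)).1.items
  else adj0.items

-- ===== PRECONDITION & SPEC =====
-- Pre_ excludes (a) offset lists that are neither nondecreasing nor nonincreasing, malformed CSR input on which
-- A's independent per-vertex ranges revisit or skip edge positions while B's forward pointer cannot, and
-- (b) nondecreasing inputs whose visited edge positions fall outside edges, where A raises IndexError.
def Pre_convert_to_adj_list (edges : List Int) (offset : List Int) : Prop :=
  (List.IsChain (· ≤ ·) offset ∧
    (2 ≤ offset.length → PySem.List.pyGetD offset 0 0 < PySem.List.pyGetD offset (-1) 0 →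
      -(edges.length : Int) ≤ PySem.List.pyGetD offset 0 0 ∧ PySem.List.pyGetD offset (-1) 0 ≤ (edges.length : Int)))
  ∨ List.IsChain (· ≥ ·) offset
instance (edges : List Int) (offset : List Int) : Decidable (Pre_convert_to_adj_list edges offset) := by
  unfold Pre_convert_to_adj_list; infer_instance

def pvWitness_convert_to_adj_list : List Int × List Int := ([1, 2, 0], [0, 2, 3, 3])

def Spec_convert_to_adj_list (edges : List Int) (offset : List Int) (out : List (Int × List Int)) : Prop := out = convert_to_adj_list_alt edges offset
instance (edges : List Int) (offset : List Int) (out : List (Int × List Int)) : Decidable (Spec_convert_to_adj_list edges offset out) := by unfold Spec_convert_to_adj_list; infer_instance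

-- ===== CLAIM (what is proved, stated in full; the proofs are below) =====
def Claim_equal_convert_to_adj_list : Prop := ∀ (edges : List Int) (offset : List Int), Dom_convert_to_adj_list edges offset → Pre_convert_to_adj_list edges offset → Spec_convert_to_adj_list edges offset (convert_to_adj_list edges offset)

-- ===== LEMMAS AND PROOFS =====

-- Abbreviations for the proofs
def eAt (edges : List Int) (j : Int) : Int := PySem.List.pyGetD edges j 0
def oAt (offset : List Int) (i : Int) : Int := PySem.List.pyGetD offset i 0
def rowStep (edges : List Int) (i : Int) (acc : List Int) (j : Int) : List Int :=
  if eAt edges j ≠ i then acc ++ [eAt edges j] else acc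
-- the row the spec assigns to vertex i
def rowOf (edges offset : List Int) (i : Int) : List Int :=
  (PySem.List.pyRange (oAt offset i) (oAt offset (i + 1)) 1).foldl (rowStep edges i) []
def rowsOf (edges offset : List Int) (a b : Int) : List (Int × List Int) :=
  (PySem.List.pyRange a b 1).map (fun i => (i, rowOf edges offset i))
def rowsInit (a b : Int) : List (Int × List Int) :=
  (PySem.List.pyRange a b 1).map (fun i => (i, ([] : List Int)))

-- modify on a dict whose items are pre ++ (k, x) :: post, k not a key of pre/post
theorem modify_middle (pre post : List (Int × List Int)) (k : Int) (x : List Int) (f : List Int → List Int)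
    (hpre : ∀ p ∈ pre, p.1 ≠ k) (hpost : ∀ p ∈ post, p.1 ≠ k) :
    (PySem.Dict.mk (pre ++ (k, x) :: post)).modify k [] f = PySem.Dict.mk (pre ++ (k, f x) :: post) := by
  have hfind : List.find? (fun p => p.1 == k) (pre ++ (k, x) :: post) = some (k, x) := by
    rw [List.find?_append, List.find?_eq_none.mpr, List.find?_cons_of_pos]
    · simp
    · simp
    · intro p hp; simp [hpre p hp]
  have hget : (PySem.Dict.mk (pre ++ (k, x) :: post)).getD k [] = x := by
    simp [PySem.Dict.getD, PySem.Dict.get?, hfind]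
  have hc : (PySem.Dict.mk (pre ++ (k, x) :: post)).contains k = true := by
    simp [PySem.Dict.contains]
  rw [PySem.Dict.modify, hget, PySem.Dict.insert, if_pos hc]
  congr 1
  simp only [List.map_append, List.map_cons, beq_self_eq_true, if_pos]
  congr 1
  · rw [List.map_congr_left (g := id), List.map_id]
    intro p hp; simp [hpre p hp]
  · congr 1
    rw [List.map_congr_left (g := id), List.map_id]
    intro p hp; simp [hpost p hp]

-- a fresh-key insert appends
theorem insert_fresh (items : List (Int × List Int)) (k : Int) (v : List Int)
    (h : ∀ p ∈ items, p.1 ≠ k) :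
    (PySem.Dict.mk items).insert k v = PySem.Dict.mk (items ++ [(k, v)]) := by
  have hc : (PySem.Dict.mk items).contains k = false := by
    simp [PySem.Dict.contains]
    intro a b hab
    exact h (a, b) hab
  apply PySem.Dict.ext
  rw [PySem.Dict.items_insert_of_not_contains _ _ hc]

-- ----- A side -----

theorem innerA (edges : List Int) (i : Int) (js : List Int) :
    ∀ (pre : List (Int × List Int)) (acc : List Int), (∀ p ∈ pre, p.1 ≠ i) →
    js.foldl
      (fun adj j =>
        if eAt edges j ≠ i then adj.modify i [] (fun l => l ++ [eAt edges j]) else adj)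
      (PySem.Dict.mk (pre ++ [(i, acc)]))
    = PySem.Dict.mk (pre ++ [(i, js.foldl (rowStep edges i) acc)]) := by
  induction js with
  | nil => intro pre acc h; simp
  | cons j t ih =>
    intro pre acc h
    simp only [List.foldl_cons]
    by_cases hj : eAt edges j ≠ i
    · rw [if_pos hj]
      have : (pre ++ [(i, acc)]) = pre ++ (i, acc) :: [] := by simp
      rw [this, modify_middle pre [] i acc _ h (by simp)]
      have := ih pre (acc ++ [eAt edges j]) h
      simpa [rowStep, hj] using this
    · rw [if_neg hj]
      have := ih pre acc h
      simpa [rowStep, hj] using this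

theorem rows_fresh (edges offset : List Int) (k : Int) :
    ∀ p ∈ rowsOf edges offset 0 k, p.1 ≠ k := by
  intro p hp
  simp only [rowsOf, List.mem_map] at hp
  obtain ⟨i, hi, rfl⟩ := hp
  have := (PySem.List.mem_pyRange_one).mp hi
  simp; omega

theorem rows_snoc (edges offset : List Int) (k : Int) (hk : 0 ≤ k) :
    rowsOf edges offset 0 (k + 1) = rowsOf edges offset 0 k ++ [(k, rowOf edges offset k)] := by
  simp [rowsOf, PySem.List.pyRange_one_succ_right hk]

theorem outerA (edges offset : List Int) :
    ∀ (m : Nat) (k : Int), 0 ≤ k → k ≤ (offset.length : Int) - 1 → ((offset.length : Int) - 1 - k).toNat = m →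
    (PySem.List.pyRange k ((offset.length : Int) - 1) 1).foldl
      (fun (adj : PySem.Dict Int (List Int)) i =>
        let adj := adj.insert i []
        (PySem.List.pyRange (PySem.List.pyGetD offset i 0) (PySem.List.pyGetD offset (i + 1) 0) 1).foldl
          (fun adj j =>
            if PySem.List.pyGetD edges j 0 ≠ i then
              adj.modify i [] (fun l => l ++ [PySem.List.pyGetD edges j 0])
            else adj)
          adj)
      (PySem.Dict.mk (rowsOf edges offset 0 k))
    = PySem.Dict.mk (rowsOf edges offset 0 ((offset.length : Int) - 1)) := by
  intro m
  induction m with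
  | zero =>
    intro k h0 hk hm
    have : k = (offset.length : Int) - 1 := by omega
    subst this
    rw [PySem.List.pyRange_one_eq_nil le_rfl]
    rfl
  | succ m ih =>
    intro k h0 hk hm
    have hkn : k < (offset.length : Int) - 1 := by omega
    rw [PySem.List.pyRange_one_cons hkn, List.foldl_cons]
    have hstep :
        (let adj := (PySem.Dict.mk (rowsOf edges offset 0 k)).insert k ([] : List Int)
         (PySem.List.pyRange (PySem.List.pyGetD offset k 0) (PySem.List.pyGetD offset (k + 1) 0) 1).foldl
          (fun adj j =>
            if PySem.List.pyGetD edges j 0 ≠ k then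
              adj.modify k [] (fun l => l ++ [PySem.List.pyGetD edges j 0])
            else adj)
          adj)
        = PySem.Dict.mk (rowsOf edges offset 0 (k + 1)) := by
      have hfresh := rows_fresh edges offset k
      have h1 := insert_fresh (rowsOf edges offset 0 k) k [] hfresh
      have h2 := innerA edges k
        (PySem.List.pyRange (oAt offset k) (oAt offset (k + 1)) 1)
        (rowsOf edges offset 0 k) [] hfresh
      simp only [eAt, oAt] at h2
      simp only [h1, h2, rows_snoc edges offset k h0, rowOf, oAt]
    rw [hstep]
    exact ih (k + 1) (by omega) (by omega) (by omega)

theorem A_eq_rows (edges offset : List Int) :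
    convert_to_adj_list edges offset = rowsOf edges offset 0 ((offset.length : Int) - 1) := by
  unfold convert_to_adj_list
  by_cases h : 0 ≤ (offset.length : Int) - 1
  · have hempty : (PySem.Dict.empty : PySem.Dict Int (List Int)) = PySem.Dict.mk (rowsOf edges offset 0 0) := by
      simp [rowsOf, PySem.List.pyRange_one_eq_nil le_rfl]
      rfl
    rw [hempty, outerA edges offset ((offset.length : Int) - 1 - 0).toNat 0 le_rfl h rfl]
  · rw [PySem.List.pyRange_one_eq_nil (by omega)]
    simp [rowsOf, PySem.List.pyRange_one_eq_nil (show (offset.length : Int) - 1 ≤ 0 by omega)]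
    rfl

-- ----- B side -----

theorem advance_stay (offset : List Int) (n j v : Int)
    (h : ¬ (v + 1 < n ∧ PySem.List.pyGetD offset (v + 1) 0 ≤ j)) :
    pyAdvance offset n j v = v := by
  rw [pyAdvance, if_neg h]

theorem blockB (edges offset : List Int) (n v : Int) (js : List Int) :
    ∀ (acc : List Int) (pre post : List (Int × List Int)),
    (∀ j ∈ js, ¬ (v + 1 < n ∧ PySem.List.pyGetD offset (v + 1) 0 ≤ j)) →
    (∀ p ∈ pre, p.1 ≠ v) → (∀ p ∈ post, p.1 ≠ v) →
    js.foldl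
      (fun (st : PySem.Dict Int (List Int) × Int) j =>
        let w := pyAdvance offset n j st.2
        let e := PySem.List.pyGetD edges j 0
        if e ≠ w then (st.1.modify w [] (fun l => l ++ [e]), w) else (st.1, w))
      (PySem.Dict.mk (pre ++ (v, acc) :: post), v)
    = (PySem.Dict.mk (pre ++ (v, js.foldl (rowStep edges v) acc) :: post), v) := by
  induction js with
  | nil => intro acc pre post _ _ _; rfl
  | cons j t ih =>
    intro acc pre post hstay hpre hpost
    simp only [List.foldl_cons]
    rw [advance_stay offset n j v (hstay j (by simp))]
    by_cases hj : PySem.List.pyGetD edges j 0 ≠ v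
    · simp only [if_pos hj]
      rw [modify_middle pre post v acc _ hpre hpost]
      have := ih (acc ++ [PySem.List.pyGetD edges j 0]) pre post
        (fun x hx => hstay x (by simp [hx])) hpre hpost
      simpa [rowStep, eAt, hj] using this
    · simp only [if_neg hj]
      have := ih acc pre post (fun x hx => hstay x (by simp [hx])) hpre hpost
      simpa [rowStep, eAt, hj] using this

theorem bumpB (edges offset : List Int) (n v : Int) (js : List Int)
    (h1 : v + 1 < n) (hge : ∀ j ∈ js, PySem.List.pyGetD offset (v + 1) 0 ≤ j)
    (d : PySem.Dict Int (List Int)) :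
    (js.foldl
      (fun (st : PySem.Dict Int (List Int) × Int) j =>
        let w := pyAdvance offset n j st.2
        let e := PySem.List.pyGetD edges j 0
        if e ≠ w then (st.1.modify w [] (fun l => l ++ [e]), w) else (st.1, w))
      (d, v)).1
    = (js.foldl
      (fun (st : PySem.Dict Int (List Int) × Int) j =>
        let w := pyAdvance offset n j st.2
        let e := PySem.List.pyGetD edges j 0
        if e ≠ w then (st.1.modify w [] (fun l => l ++ [e]), w) else (st.1, w))
      (d, v + 1)).1 := by
  cases js with
  | nil => rfl
  | cons j t =>
    simp only [List.foldl_cons]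
    rw [show pyAdvance offset n j v = pyAdvance offset n j (v + 1) from by
      rw [pyAdvance, if_pos ⟨h1, hge j (by simp)⟩]]

theorem mono_oAt (offset : List Int) (hc : List.IsChain (· ≤ ·) offset) :
    ∀ i k : Int, 0 ≤ i → i ≤ k → k ≤ (offset.length : Int) - 1 →
    oAt offset i ≤ oAt offset k := by
  intro i k h0 hik hk
  have hilt : i < (offset.length : Int) := by omega
  have hklt : k < (offset.length : Int) := by omega
  rw [oAt, PySem.List.pyGetD_eq_getElem offset 0 h0 hilt,
      oAt, PySem.List.pyGetD_eq_getElem offset 0 (by omega) hklt]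
  have hp : offset.Pairwise (· ≤ ·) := hc.pairwise
  rcases Nat.lt_or_ge i.toNat k.toNat with hlt | hge
  · exact List.pairwise_iff_getElem.mp hp i.toNat k.toNat (by omega) (by omega) hlt
  · have : i.toNat = k.toNat := by omega
    simp [this]

theorem rowsInit_fresh (a b v : Int) (hv : v < a) :
    ∀ p ∈ rowsInit a b, p.1 ≠ v := by
  intro p hp
  simp only [rowsInit, List.mem_map] at hp
  obtain ⟨i, hi, rfl⟩ := hp
  have := (PySem.List.mem_pyRange_one).mp hi
  simp; omega

theorem mainB (edges offset : List Int) (hc : List.IsChain (· ≤ ·) offset) :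
    ∀ (m : Nat) (v0 : Int), 0 ≤ v0 → v0 ≤ (offset.length : Int) - 1 - 1 →
    ((offset.length : Int) - 1 - 1 - v0).toNat = m →
    ∀ (done : List (Int × List Int)), (∀ p ∈ done, p.1 < v0) →
    ((PySem.List.pyRange (oAt offset v0) (oAt offset ((offset.length : Int) - 1)) 1).foldl
      (fun (st : PySem.Dict Int (List Int) × Int) j =>
        let w := pyAdvance offset ((offset.length : Int) - 1) j st.2
        let e := PySem.List.pyGetD edges j 0
        if e ≠ w then (st.1.modify w [] (fun l => l ++ [e]), w) else (st.1, w))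
      (PySem.Dict.mk (done ++ rowsInit v0 ((offset.length : Int) - 1)), v0)).1.items
    = done ++ rowsOf edges offset v0 ((offset.length : Int) - 1) := by
  intro m
  induction m with
  | zero =>
    intro v0 h0 hv hm done hdone
    have hn : (offset.length : Int) - 1 = v0 + 1 := by omega
    have hinit : rowsInit v0 ((offset.length : Int) - 1) = [(v0, ([] : List Int))] := by
      rw [hn, rowsInit, PySem.List.pyRange_one_singleton]; rfl
    have hstay : ∀ j ∈ PySem.List.pyRange (oAt offset v0) (oAt offset ((offset.length : Int) - 1)) 1,
        ¬ (v0 + 1 < (offset.length : Int) - 1 ∧ PySem.List.pyGetD offset (v0 + 1) 0 ≤ j) := by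
      intro j _ hcontra; omega
    have hb := blockB edges offset ((offset.length : Int) - 1) v0
      (PySem.List.pyRange (oAt offset v0) (oAt offset ((offset.length : Int) - 1)) 1)
      [] done [] hstay (fun p hp => by have := hdone p hp; omega) (by simp)
    rw [hinit, show done ++ [(v0, ([] : List Int))] = done ++ (v0, ([] : List Int)) :: [] from by simp,
      hb]
    rw [rowsOf, hn, PySem.List.pyRange_one_singleton]
    simp [rowOf]
  | succ m ih =>
    intro v0 h0 hv hm done hdone
    have hvlt : v0 < (offset.length : Int) - 1 - 1 := by omega
    have m1 : oAt offset v0 ≤ oAt offset (v0 + 1) :=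
      mono_oAt offset hc v0 (v0 + 1) h0 (by omega) (by omega)
    have m2 : oAt offset (v0 + 1) ≤ oAt offset ((offset.length : Int) - 1) :=
      mono_oAt offset hc (v0 + 1) ((offset.length : Int) - 1) (by omega) (by omega) (by omega)
    rw [PySem.List.pyRange_one_append (oAt offset v0) (oAt offset (v0 + 1))
        (oAt offset ((offset.length : Int) - 1)) m1 m2, List.foldl_append]
    have hsplit : rowsInit v0 ((offset.length : Int) - 1)
        = (v0, ([] : List Int)) :: rowsInit (v0 + 1) ((offset.length : Int) - 1) := by
      rw [rowsInit, PySem.List.pyRange_one_cons (show v0 < (offset.length : Int) - 1 by omega)]; rfl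
    have hstay : ∀ j ∈ PySem.List.pyRange (oAt offset v0) (oAt offset (v0 + 1)) 1,
        ¬ (v0 + 1 < (offset.length : Int) - 1 ∧ PySem.List.pyGetD offset (v0 + 1) 0 ≤ j) := by
      intro j hj hcontra
      have := (PySem.List.mem_pyRange_one).mp hj
      have : j < oAt offset (v0 + 1) := this.2
      rw [oAt] at this
      omega
    have hb := blockB edges offset ((offset.length : Int) - 1) v0
      (PySem.List.pyRange (oAt offset v0) (oAt offset (v0 + 1)) 1)
      [] done (rowsInit (v0 + 1) ((offset.length : Int) - 1)) hstay
      (fun p hp => by have := hdone p hp; omega)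
      (rowsInit_fresh (v0 + 1) ((offset.length : Int) - 1) v0 (by omega))
    rw [hsplit, hb]
    have hge : ∀ j ∈ PySem.List.pyRange (oAt offset (v0 + 1)) (oAt offset ((offset.length : Int) - 1)) 1,
        PySem.List.pyGetD offset (v0 + 1) 0 ≤ j := by
      intro j hj
      have := (PySem.List.mem_pyRange_one).mp hj
      rw [show PySem.List.pyGetD offset (v0 + 1) 0 = oAt offset (v0 + 1) from rfl]
      exact this.1
    rw [bumpB edges offset ((offset.length : Int) - 1) v0
      (PySem.List.pyRange (oAt offset (v0 + 1)) (oAt offset ((offset.length : Int) - 1)) 1)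
      (by omega) hge]
    have hassoc : done ++ (v0, List.foldl (rowStep edges v0) []
          (PySem.List.pyRange (oAt offset v0) (oAt offset (v0 + 1)) 1))
          :: rowsInit (v0 + 1) ((offset.length : Int) - 1)
        = (done ++ [(v0, rowOf edges offset v0)]) ++ rowsInit (v0 + 1) ((offset.length : Int) - 1) := by
      simp [rowOf]
    rw [hassoc, ih (v0 + 1) (by omega) (by omega) (by omega)
      (done ++ [(v0, rowOf edges offset v0)])
      (by intro p hp; rcases List.mem_append.mp hp with h | h
          · have := hdone p h; omega
          · rcases List.mem_singleton.mp h with rfl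
            simp)]
    simp [rowsOf, PySem.List.pyRange_one_cons (show v0 < (offset.length : Int) - 1 by omega)]

theorem init_items (N : Int) :
    ((PySem.List.pyRange 0 N 1).foldl (fun (d : PySem.Dict Int (List Int)) i => d.insert i []) PySem.Dict.empty)
    = PySem.Dict.mk (rowsInit 0 N) := by
  apply PySem.Dict.ext
  have hi := PySem.Dict.items_foldl_insert_fresh (PySem.List.pyRange 0 N 1) (fun a => a)
    (fun _ => ([] : List Int)) PySem.Dict.empty (by intro a _; simp)
    (by simpa using PySem.List.nodup_pyRange_one 0 N)
  simpa [rowsInit] using hi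

theorem last_oAt (offset : List Int) (h : 1 ≤ (offset.length : Int) - 1) :
    PySem.List.pyGetD offset (-1) 0 = oAt offset ((offset.length : Int) - 1) := by
  have hne : offset ≠ [] := by
    intro hx; subst hx; simp at h
  rw [PySem.List.pyGetD_neg_one offset 0 hne, oAt,
    PySem.List.pyGetD_eq_getElem offset 0 (by omega) (by omega),
    List.getLast_eq_getElem]
  simp [show ((offset.length : Int) - 1).toNat = offset.length - 1 by omega]

theorem B_eq_rows (edges offset : List Int) (hc : List.IsChain (· ≤ ·) offset) :
    convert_to_adj_list_alt edges offset = rowsOf edges offset 0 ((offset.length : Int) - 1) := by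
  unfold convert_to_adj_list_alt
  by_cases h : 1 ≤ (offset.length : Int) - 1
  · rw [if_pos h, init_items, last_oAt offset h]
    have hmain := mainB edges offset hc ((offset.length : Int) - 1 - 1 - 0).toNat 0 le_rfl
      (by omega) rfl [] (by simp)
    simpa [oAt] using hmain
  · rw [if_neg h, init_items]
    simp [rowsInit, rowsOf, PySem.List.pyRange_one_eq_nil (show (offset.length : Int) - 1 ≤ 0 by omega)]

theorem anti_oAt (offset : List Int) (hc : List.IsChain (· ≥ ·) offset) :
    ∀ i k : Int, 0 ≤ i → i ≤ k → k ≤ (offset.length : Int) - 1 →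
    oAt offset k ≤ oAt offset i := by
  intro i k h0 hik hk
  have hilt : i < (offset.length : Int) := by omega
  have hklt : k < (offset.length : Int) := by omega
  rw [oAt, PySem.List.pyGetD_eq_getElem offset 0 (by omega) hklt,
      oAt, PySem.List.pyGetD_eq_getElem offset 0 h0 hilt]
  have hp : offset.Pairwise (· ≥ ·) := hc.pairwise
  rcases Nat.lt_or_ge i.toNat k.toNat with hlt | hge
  · exact List.pairwise_iff_getElem.mp hp i.toNat k.toNat (by omega) (by omega) hlt
  · have : i.toNat = k.toNat := by omega
    simp [this]

theorem rowsInit_eq_rowsOf_anti (edges offset : List Int) (hc : List.IsChain (· ≥ ·) offset) :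
    rowsInit 0 ((offset.length : Int) - 1) = rowsOf edges offset 0 ((offset.length : Int) - 1) := by
  rw [rowsInit, rowsOf]
  apply List.map_congr_left
  intro i hi
  have hmem := (PySem.List.mem_pyRange_one).mp hi
  have hrow : rowOf edges offset i = [] := by
    rw [rowOf, PySem.List.pyRange_one_eq_nil
      (anti_oAt offset hc i (i + 1) hmem.1 (by omega) (by omega))]
    rfl
  rw [hrow]

theorem B_eq_rows_anti (edges offset : List Int) (hc : List.IsChain (· ≥ ·) offset) :
    convert_to_adj_list_alt edges offset = rowsOf edges offset 0 ((offset.length : Int) - 1) := by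
  unfold convert_to_adj_list_alt
  by_cases h : 1 ≤ (offset.length : Int) - 1
  · rw [if_pos h, init_items, last_oAt offset h, PySem.List.pyRange_one_eq_nil
      (show oAt offset ((offset.length : Int) - 1) ≤ PySem.List.pyGetD offset 0 0 from
        anti_oAt offset hc 0 ((offset.length : Int) - 1) le_rfl (by omega) le_rfl)]
    simpa using rowsInit_eq_rowsOf_anti edges offset hc
  · rw [if_neg h, init_items]
    simp [rowsInit, rowsOf, PySem.List.pyRange_one_eq_nil (show (offset.length : Int) - 1 ≤ 0 by omega)]

theorem A_eq_rows_anti (edges offset : List Int) (hc : List.IsChain (· ≥ ·) offset) :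
    convert_to_adj_list edges offset = convert_to_adj_list_alt edges offset := by
  rw [A_eq_rows, B_eq_rows_anti edges offset hc]

-- ===== VERDICT (by name: the statement is the Claim_ definition above) =====
theorem convert_to_adj_list_spec : Claim_equal_convert_to_adj_list := by
  intro edges offset _hdom hpre
  unfold Spec_convert_to_adj_list
  rcases hpre with hmono | hanti
  · rw [A_eq_rows, B_eq_rows edges offset hmono.1]
  · exact A_eq_rows_anti edges offset hanti
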